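-- pv_equiv track=rewrite | github.com/SatoryKono/ChEMBL_dataAcquisition | library/normalize_testitems.py | _normalise_synonyms
-- ===== SOURCE A (Python) =====
-- from typing import Any, Iterable, Mapping
--
-- def _clean_string(value: Any) -> str | None:
--     if value is None:
--         return None
--     if isinstance(value, str):
--         stripped = value.strip()
--         return stripped or None
--     return str(value)
--
-- def _normalise_sequence(values: Iterable[Any]) -> list[str]:
--     items: list[str] = []
--     seen: set[str] = set()
--     for value in values:
--         text = _clean_string(value)
--         if text is None:
--             continue
--         if text in seen:
--             continue
--         seen.add(text)
--         items.append(text)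
--     items.sort()
--     return items
--
-- def _normalise_synonyms(entries: Iterable[Mapping[str, Any]]) -> list[str]:
--     synonyms = []
--     for entry in entries:
--         synonym = _clean_string(entry.get("synonyms"))
--         if synonym is None:
--             continue
--         synonyms.append(synonym)
--     return _normalise_sequence(synonyms)
-- ===== SOURCE B (Python) =====
-- from typing import Any, Iterable, Mapping
--
--
-- def _clean_string(value: Any) -> str | None:
--     if value is None:
--         return None
--     if isinstance(value, str):
--         stripped = value.strip()
--         return stripped or None
--     return str(value)
--
--
-- def _normalise_synonyms(entries: Iterable[Mapping[str, Any]]) -> list[str]: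
--     synonyms = []
--     for entry in entries:
--         synonym = _clean_string(entry.get("synonyms"))
--         if synonym is None:
--             continue
--         synonyms.append(synonym)
--     synonyms.sort()
--     result: list[str] = []
--     prev = None
--     for s in synonyms:
--         if s != prev:
--             result.append(s)
--             prev = s
--     return result
-- ===== Notes on version B (the rewrite author's own statement) =====
-- stated objective: alternative
-- what changed: Deduplication by a maintained hash set followed by a sort is replaced by sort-first then a single linear adjacent-unique pass that keeps only the previously emitted value.
import Mathlib
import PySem

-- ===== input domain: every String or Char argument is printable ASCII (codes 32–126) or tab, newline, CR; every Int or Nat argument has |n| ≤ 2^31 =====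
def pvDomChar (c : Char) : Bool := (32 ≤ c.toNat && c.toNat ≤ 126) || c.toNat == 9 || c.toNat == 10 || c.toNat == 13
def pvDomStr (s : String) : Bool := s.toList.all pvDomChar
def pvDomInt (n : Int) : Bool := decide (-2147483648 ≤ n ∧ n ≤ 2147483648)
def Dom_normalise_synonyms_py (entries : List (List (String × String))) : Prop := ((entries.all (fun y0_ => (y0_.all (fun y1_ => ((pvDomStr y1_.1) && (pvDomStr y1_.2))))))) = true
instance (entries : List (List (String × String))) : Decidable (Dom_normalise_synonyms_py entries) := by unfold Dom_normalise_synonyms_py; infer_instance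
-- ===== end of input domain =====

-- B replaces A's hash-set dedup-then-sort by sort-first then one adjacent-unique pass (alternative decomposition, same result).

-- ===== PORT A =====
-- _clean_string restricted to its uses here: the argument is a str or None (the dicts are str -> str)
def pvCleanStr (value : String) : Option String :=
  let stripped := PySem.Str.strip value
  if stripped = "" then none else some stripped

def pvClean (value : Option String) : Option String :=
  match value with
  | none => none
  | some s => pvCleanStr s

-- the extraction loop of _normalise_synonyms, identical code in A and in B
def pvCollect (entries : List (List (String × String))) : List String :=
  entries.foldl (fun synonyms entry =>
    match pvClean ((PySem.Dict.mk entry).get? "synonyms") with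
    | none => synonyms
    | some synonym => synonyms ++ [synonym]) []

-- _normalise_sequence: dedupe with a seen-set keeping first occurrences, then sort
def pvNormaliseSequence (values : List String) : List String :=
  let st := values.foldl (fun (st : List String × PySem.Set String) value =>
      match pvCleanStr value with
      | none => st
      | some text =>
        if PySem.Set.contains st.2 text then st
        else (st.1 ++ [text], PySem.Set.add st.2 text)) ([], PySem.Set.empty)
  PySem.List.sorted st.1 (fun x => x) false

def normalise_synonyms_py (entries : List (List (String × String))) : List String :=
  pvNormaliseSequence (pvCollect entries)

-- ===== PORT B =====
-- s != prev, where prev is None or the previously emitted string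
def pvNe (prev : Option String) (s : String) : Bool :=
  match prev with
  | none => true
  | some p => decide (s ≠ p)

def normalise_synonyms_py_alt (entries : List (List (String × String))) : List String :=
  let synonyms := pvCollect entries
  let sortedSynonyms := PySem.List.sorted synonyms (fun x => x) false
  (sortedSynonyms.foldl (fun (st : List String × Option String) s =>
      if pvNe st.2 s then (st.1 ++ [s], some s)
      else st) ([], none)).1

-- ===== PRECONDITION & SPEC =====
def Spec_normalise_synonyms_py (entries : List (List (String × String))) (out : List String) : Prop := out = normalise_synonyms_py_alt entries
instance (entries : List (List (String × String))) (out : List String) : Decidable (Spec_normalise_synonyms_py entries out) := by unfold Spec_normalise_synonyms_py; infer_instance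

-- ===== CLAIM (what is proved, stated in full; the proofs are below) =====
def Claim_equal_normalise_synonyms_py : Prop := ∀ (entries : List (List (String × String))), Dom_normalise_synonyms_py entries → Spec_normalise_synonyms_py entries (normalise_synonyms_py entries)

-- ===== LEMMAS AND PROOFS =====

-- recursive form of B's adjacent-unique loop (proof helper only)
def pvAdj (prev : Option String) : List String → List String
  | [] => []
  | x :: xs =>
    if pvNe prev x then x :: pvAdj (some x) xs
    else pvAdj prev xs

lemma pvAdj_foldl (l : List String) : ∀ (acc : List String) (prev : Option String),
    (l.foldl (fun (st : List String × Option String) s =>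
      if pvNe st.2 s then (st.1 ++ [s], some s)
      else st) (acc, prev)).1 = acc ++ pvAdj prev l := by
  induction l with
  | nil => intro acc prev; simp [pvAdj]
  | cons x xs ih =>
    intro acc prev
    simp only [List.foldl_cons, pvAdj]
    by_cases h : pvNe prev x = true <;> simp [h, ih]

lemma pvAdj_mem {x : String} : ∀ (prev : Option String) (l : List String),
    x ∈ pvAdj prev l → x ∈ l := by
  intro prev l
  induction l generalizing prev with
  | nil => simp [pvAdj]
  | cons y ys ih =>
    intro h
    simp only [pvAdj] at h
    by_cases hc : pvNe prev y = true
    · rw [if_pos hc] at h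
      rcases List.mem_cons.mp h with rfl | h
      · exact List.mem_cons_self ..
      · exact List.mem_cons_of_mem _ (ih _ h)
    · rw [if_neg hc] at h
      exact List.mem_cons_of_mem _ (ih _ h)

lemma pvNe_eq_false {prev : Option String} {y : String} (hc : ¬ pvNe prev y = true) :
    prev = some y := by
  cases prev with
  | none => simp [pvNe] at hc
  | some p =>
    have : y = p := by simpa [pvNe] using hc
    rw [this]

lemma pvAdj_mem_rev {x : String} : ∀ (prev : Option String) (l : List String),
    x ∈ l → x ∈ pvAdj prev l ∨ prev = some x := by
  intro prev l
  induction l generalizing prev with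
  | nil => simp
  | cons y ys ih =>
    intro h
    simp only [pvAdj]
    by_cases hc : pvNe prev y = true
    · rw [if_pos hc]
      rcases List.mem_cons.mp h with rfl | h
      · exact Or.inl (List.mem_cons_self ..)
      · rcases ih (some y) h with h' | h'
        · exact Or.inl (List.mem_cons_of_mem _ h')
        · exact Or.inl (by rw [Option.some.inj h']; exact List.mem_cons_self ..)
    · rw [if_neg hc]
      rcases List.mem_cons.mp h with rfl | h
      · exact Or.inr (pvNe_eq_false hc)
      · exact ih prev h

lemma pvAdj_pairwise : ∀ (l : List String) (prev : Option String),
    l.Pairwise (· ≤ ·) → (∀ p, prev = some p → ∀ x ∈ l, p ≤ x) →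
    (pvAdj prev l).Pairwise (· < ·) ∧ ∀ y ∈ pvAdj prev l, ∀ p, prev = some p → p < y := by
  intro l
  induction l with
  | nil => intro prev _ _; exact ⟨List.Pairwise.nil, by simp [pvAdj]⟩
  | cons y ys ih =>
    intro prev hp hlow
    obtain ⟨hy, hys⟩ := List.pairwise_cons.mp hp
    simp only [pvAdj]
    by_cases hc : pvNe prev y = true
    · rw [if_pos hc]
      obtain ⟨ih1, ih2⟩ := ih (some y) hys (by
        intro p hpe x hx
        have : y = p := Option.some.inj hpe
        subst this
        exact hy x hx)
      refine ⟨List.pairwise_cons.mpr ⟨fun z hz => ih2 z hz y rfl, ih1⟩, ?_⟩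
      intro z hz p hpv
      have hpy : p < y := by
        subst hpv
        have hne : y ≠ p := by simpa [pvNe] using hc
        exact lt_of_le_of_ne (hlow p rfl y (List.mem_cons_self ..)) (Ne.symm hne)
      rcases List.mem_cons.mp hz with rfl | hz
      · exact hpy
      · exact lt_trans hpy (ih2 z hz y rfl)
    · rw [if_neg hc]
      have hprev : prev = some y := pvNe_eq_false hc
      subst hprev
      exact ih (some y) hys (by
        intro p hpe x hx
        have : y = p := Option.some.inj hpe
        subst this
        exact hy x hx)

-- str.strip is idempotent
lemma pv_dropWhile_fix {p : Char → Bool} {l r : List Char}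
    (hl : List.dropWhile p l = l) (hr : r <+: l) : List.dropWhile p r = r := by
  cases r with
  | nil => simp
  | cons a r' =>
    obtain ⟨t, ht⟩ := hr
    subst ht
    have ha : ¬ p a = true := by
      have h0 : 0 < ((a :: r') ++ t).length := by simp
      have := List.dropWhile_eq_self_iff.mp hl h0
      simpa using this
    rw [List.dropWhile_cons, if_neg ha]

lemma pv_chars_strip_strip (cs : List Char) :
    PySem.Chars.strip (PySem.Chars.strip cs) = PySem.Chars.strip cs := by
  simp only [PySem.Chars.strip, PySem.Chars.lstrip, PySem.Chars.rstrip]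
  set p := PySem.Chars.isspace
  set l := List.dropWhile p cs with hl
  set r := (List.dropWhile p l.reverse).reverse with hr
  have hlfix : List.dropWhile p l = l := List.dropWhile_idempotent p cs
  have hrpre : r <+: l := by
    have h := List.reverse_prefix.mpr (List.dropWhile_suffix (l := l.reverse) p)
    simpa using h
  rw [pv_dropWhile_fix hlfix hrpre, hr, List.reverse_reverse, List.dropWhile_idempotent]

lemma pv_strip_strip (s : String) :
    PySem.Str.strip (PySem.Str.strip s) = PySem.Str.strip s := by
  have h : (PySem.Str.strip (PySem.Str.strip s)).toList = (PySem.Str.strip s).toList := by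
    simp [pv_chars_strip_strip]
  exact String.toList_inj.mp h

-- a value _clean_string has produced is a fixpoint of _clean_string
lemma pvCleanStr_fix {v x : String} (h : pvCleanStr v = some x) : pvCleanStr x = some x := by
  simp only [pvCleanStr] at h ⊢
  split at h
  · exact absurd h (by simp)
  · rename_i hne
    have hx : x = PySem.Str.strip v := by simpa using h.symm
    subst hx
    rw [pv_strip_strip]
    simp [hne]

lemma pvCollect_clean (entries : List (List (String × String))) :
    ∀ x ∈ pvCollect entries, pvCleanStr x = some x := by
  unfold pvCollect
  suffices h : ∀ (acc : List String), (∀ x ∈ acc, pvCleanStr x = some x) →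
      ∀ x ∈ entries.foldl (fun synonyms entry =>
        match pvClean ((PySem.Dict.mk entry).get? "synonyms") with
        | none => synonyms
        | some synonym => synonyms ++ [synonym]) acc, pvCleanStr x = some x by
    exact h [] (by simp)
  induction entries with
  | nil => intro acc hacc; simpa using hacc
  | cons e es ih =>
    intro acc hacc
    simp only [List.foldl_cons]
    apply ih
    intro x hx
    revert hx
    split
    · exact hacc x
    · rename_i syn hsyn
      intro hx
      rcases List.mem_append.mp hx with hx | hx
      · exact hacc x hx
      · have : x = syn := by simpa using hx
        subst this
        simp only [pvClean] at hsyn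
        split at hsyn
        · exact absurd hsyn (by simp)
        · exact pvCleanStr_fix hsyn

-- A's dedup loop over clean-fixed values is exactly set(values) kept in first-occurrence order
lemma pvSeq_fold (l : List String) : ∀ (s : List String), (∀ v ∈ l, pvCleanStr v = some v) →
    l.foldl (fun (st : List String × PySem.Set String) value =>
      match pvCleanStr value with
      | none => st
      | some text =>
        if PySem.Set.contains st.2 text then st
        else (st.1 ++ [text], PySem.Set.add st.2 text)) (s, s)
    = (l.foldl PySem.Set.add s, l.foldl PySem.Set.add s) := by
  induction l with
  | nil => intro s _; rfl
  | cons v vs ih =>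
    intro s hclean
    have hv : pvCleanStr v = some v := hclean v (List.mem_cons_self ..)
    simp only [List.foldl_cons, hv]
    by_cases hc : PySem.Set.contains s v = true
    · rw [if_pos hc]
      have hadd : PySem.Set.add s v = s := by
        simp only [PySem.Set.add, PySem.Set.contains]
        rw [if_pos (show List.contains s v = true from hc)]
      rw [hadd]
      exact ih s (fun x hx => hclean x (List.mem_cons_of_mem _ hx))
    · rw [if_neg hc]
      have hadd : PySem.Set.add s v = s ++ [v] := by
        simp only [PySem.Set.add, PySem.Set.contains]
        rw [if_neg (show ¬ List.contains s v = true from hc)]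
      rw [hadd]
      exact ih (s ++ [v]) (fun x hx => hclean x (List.mem_cons_of_mem _ hx))

-- ===== VERDICT (by name: the statement is the Claim_ definition above) =====
theorem normalise_synonyms_py_spec : Claim_equal_normalise_synonyms_py := by
  intro entries _
  unfold Spec_normalise_synonyms_py
  have hclean : ∀ x ∈ pvCollect entries, pvCleanStr x = some x := pvCollect_clean entries
  -- A computes sorted(set(synonyms) in first-occurrence order)
  have hA : normalise_synonyms_py entries
      = PySem.List.sorted (PySem.Set.ofList (pvCollect entries)) (fun x => x) false := by
    show PySem.List.sorted (((pvCollect entries).foldl (fun (st : List String × PySem.Set String) value =>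
      match pvCleanStr value with
      | none => st
      | some text =>
        if PySem.Set.contains st.2 text then st
        else (st.1 ++ [text], PySem.Set.add st.2 text)) (([] : List String), ([] : List String))).1) (fun x => x) false = _
    rw [pvSeq_fold (pvCollect entries) [] hclean, ← PySem.Set.ofList_eq_foldl]
  -- B computes the adjacent-unique pass over the sorted list
  have hB : normalise_synonyms_py_alt entries
      = pvAdj none (PySem.List.sorted (pvCollect entries) (fun x => x) false) := by
    show ((PySem.List.sorted (pvCollect entries) (fun x => x) false).foldl (fun (st : List String × Option String) s =>
      if pvNe st.2 s then (st.1 ++ [s], some s)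
      else st) ([], none)).1 = _
    rw [pvAdj_foldl _ [] none, List.nil_append]
  rw [hA, hB]
  set ss := PySem.List.sorted (pvCollect entries) (fun x => x) false with hss
  have hsp : ss.Pairwise (· ≤ ·) := by
    have h := PySem.List.sorted_pairwise (pvCollect entries) (fun x => x)
    simpa [hss] using h
  obtain ⟨hlt, -⟩ := pvAdj_pairwise ss none hsp (by simp)
  have hnd : (pvAdj none ss).Nodup := hlt.imp ne_of_lt
  have hmem : ∀ x, x ∈ pvAdj none ss ↔ x ∈ PySem.Set.ofList (pvCollect entries) := by
    intro x
    rw [PySem.Set.mem_ofList]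
    constructor
    · intro hx
      have h := pvAdj_mem none ss hx
      rwa [hss, PySem.List.mem_sorted] at h
    · intro hx
      have hx' : x ∈ ss := by rw [hss, PySem.List.mem_sorted]; exact hx
      rcases pvAdj_mem_rev none ss hx' with h | h
      · exact h
      · simp at h
  have hperm : (pvAdj none ss).Perm (PySem.Set.ofList (pvCollect entries)) :=
    (List.perm_ext_iff_of_nodup hnd (PySem.Set.nodup_ofList _)).mpr hmem
  exact PySem.List.sorted_eq_of_perm_of_pairwise_lt _ _ _ hperm hlt
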